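-- pv_equiv track=rewrite | github.com/ManaswithaGarine/Resume-to-Deet-InstantRegistrationSystem | nlp_extraction/experience_parser.py | parse_experience
-- ===== SOURCE A (Python) =====
-- EDU_KEYWORDS   = ["bachelor", "master", "phd", "b.tech", "m.tech", "bsc", "msc",
--                    "b.e", "m.e", "diploma", "degree", "university", "college",
--                    "institute", "school"]
--
-- EXP_KEYWORDS   = ["intern", "engineer", "developer", "analyst", "manager",
--                    "consultant", "associate", "lead", "coordinator", "officer"]
--
-- def parse_experience(text: str) -> dict:
--     """
--     Returns:
--         {
--           "education":  list of str,
--           "experience": list of str,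
--         }
--     """
--     lines      = [l.strip() for l in text.splitlines() if l.strip()]
--     education  = []
--     experience = []
--
--     for line in lines:
--         ll = line.lower()
--         if any(kw in ll for kw in EDU_KEYWORDS) and len(line) < 200:
--             education.append(line)
--         elif any(kw in ll for kw in EXP_KEYWORDS) and len(line) < 200:
--             experience.append(line)
--
--     # Deduplicate while preserving order
--     seen = set()
--     education  = [x for x in education  if not (x in seen or seen.add(x))]
--     seen = set()
--     experience = [x for x in experience if not (x in seen or seen.add(x))]
--
--     return {
--         "education":  education[:6],
--         "experience": experience[:6],
--     }
-- ===== SOURCE B (Python) =====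
-- EDU_KEYWORDS   = ["bachelor", "master", "phd", "b.tech", "m.tech", "bsc", "msc",
--                    "b.e", "m.e", "diploma", "degree", "university", "college",
--                    "institute", "school"]
--
-- EXP_KEYWORDS   = ["intern", "engineer", "developer", "analyst", "manager",
--                    "consultant", "associate", "lead", "coordinator", "officer"]
--
-- def _category(line):
--     # Pure classifier: which bucket (if any) a stripped line belongs to.
--     if len(line) >= 200:
--         return None
--     ll = line.lower()
--     if any(kw in ll for kw in EDU_KEYWORDS):
--         return "education"
--     if any(kw in ll for kw in EXP_KEYWORDS):
--         return "experience"
--     return None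
--
-- def parse_experience(text: str) -> dict:
--     # Swap the stages: deduplicate ALL lines globally first (classification is a pure
--     # function of the line and the buckets are disjoint, so per-bucket dedup is the
--     # same as global dedup), then classify the distinct lines.
--     distinct = dict.fromkeys(l.strip() for l in text.splitlines() if l.strip())
--     return {
--         "education":  [l for l in distinct if _category(l) == "education"][:6],
--         "experience": [l for l in distinct if _category(l) == "experience"][:6],
--     }
-- ===== Notes on version B (the rewrite author's own statement) =====
-- stated objective: faster
-- what changed: Reverses the stage order: B deduplicates all stripped non-empty lines globally first (dict.fromkeys) and then classifies only the distinct lines with an Option-valued category function and two filter comprehensions, instead of A's classify-every-line pass followed by two per-list seen-set dedup passes; correct because the classifier is a pure function of the line and the two buckets are disjoint.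
import Mathlib
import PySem

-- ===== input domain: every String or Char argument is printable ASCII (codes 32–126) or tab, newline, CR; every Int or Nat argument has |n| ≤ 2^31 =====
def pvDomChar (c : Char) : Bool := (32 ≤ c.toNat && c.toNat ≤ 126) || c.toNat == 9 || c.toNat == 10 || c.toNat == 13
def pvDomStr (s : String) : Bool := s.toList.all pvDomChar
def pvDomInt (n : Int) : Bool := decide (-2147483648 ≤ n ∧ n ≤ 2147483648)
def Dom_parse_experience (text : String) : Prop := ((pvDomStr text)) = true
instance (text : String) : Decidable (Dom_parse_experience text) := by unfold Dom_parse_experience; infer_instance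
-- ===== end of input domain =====

-- B swaps the stages: it deduplicates all stripped non-empty lines globally first
-- (dict.fromkeys) and then classifies the distinct lines with a category function,
-- instead of A's classify-into-two-lists-then-two-per-list-dedup-passes; return value only.

-- ===== PORT A =====
def pvEduKw : List String := ["bachelor", "master", "phd", "b.tech", "m.tech", "bsc", "msc",
  "b.e", "m.e", "diploma", "degree", "university", "college", "institute", "school"]

def pvExpKw : List String := ["intern", "engineer", "developer", "analyst", "manager",
  "consultant", "associate", "lead", "coordinator", "officer"]

-- body of A's for-loop (education/experience accumulators, appended at the end)
def pvStepA (acc : List String × List String) (line : String) : List String × List String :=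
  let ll := PySem.Str.lower line
  if (pvEduKw.any fun kw => PySem.Str.isIn kw ll) && decide (PySem.Str.len line < 200) then
    (acc.1 ++ [line], acc.2)
  else if (pvExpKw.any fun kw => PySem.Str.isIn kw ll) && decide (PySem.Str.len line < 200) then
    (acc.1, acc.2 ++ [line])
  else acc

-- A's '[x for x in xs if not (x in seen or seen.add(x))]' dedup comprehension
def pvDedupA (seen : PySem.Set String) : List String → List String
  | [] => []
  | x :: xs => if PySem.Set.contains seen x then pvDedupA seen xs
               else x :: pvDedupA (PySem.Set.add seen x) xs

def parse_experience (text : String) : List (String × List String) :=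
  let lines := ((PySem.Str.splitlines text).map PySem.Str.strip).filter (fun l => decide (l ≠ ""))
  let p := lines.foldl pvStepA ([], [])
  let education := pvDedupA PySem.Set.empty p.1
  let experience := pvDedupA PySem.Set.empty p.2
  [("education", PySem.List.slice education none (some 6)),
   ("experience", PySem.List.slice experience none (some 6))]

-- ===== PORT B =====
-- B's pure classifier '_category'
def pvCategory (line : String) : Option String :=
  if 200 ≤ PySem.Str.len line then none
  else
    let ll := PySem.Str.lower line
    if pvEduKw.any fun kw => PySem.Str.isIn kw ll then some "education"
    else if pvExpKw.any fun kw => PySem.Str.isIn kw ll then some "experience"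
    else none

def parse_experience_alt (text : String) : List (String × List String) :=
  -- dict.fromkeys(...) = PySem.List.dedup (first occurrences, in order)
  let distinct := PySem.List.dedup
    (((PySem.Str.splitlines text).map PySem.Str.strip).filter (fun l => decide (l ≠ "")))
  [("education",
      PySem.List.slice (distinct.filter fun l => pvCategory l == some "education") none (some 6)),
   ("experience",
      PySem.List.slice (distinct.filter fun l => pvCategory l == some "experience") none (some 6))]

-- ===== PRECONDITION & SPEC =====
def Spec_parse_experience (text : String) (out : List (String × List String)) : Prop := out = parse_experience_alt text
instance (text : String) (out : List (String × List String)) : Decidable (Spec_parse_experience text out) := by unfold Spec_parse_experience; infer_instance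

-- ===== CLAIM (what is proved, stated in full; the proofs are below) =====
def Claim_equal_parse_experience : Prop := ∀ (text : String), Dom_parse_experience text → Spec_parse_experience text (parse_experience text)

-- ===== LEMMAS AND PROOFS =====

def pvCondE (line : String) : Bool :=
  (pvEduKw.any fun kw => PySem.Str.isIn kw (PySem.Str.lower line)) && decide (PySem.Str.len line < 200)

def pvCondX (line : String) : Bool :=
  !pvCondE line &&
    ((pvExpKw.any fun kw => PySem.Str.isIn kw (PySem.Str.lower line)) && decide (PySem.Str.len line < 200))

theorem stepA_eq (acc : List String × List String) (l : String) :
    pvStepA acc l =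
      (if pvCondE l then acc.1 ++ [l] else acc.1, if pvCondX l then acc.2 ++ [l] else acc.2) := by
  cases hE : (pvEduKw.any fun kw => PySem.Str.isIn kw (PySem.Str.lower l)) && decide (PySem.Str.len l < 200) <;>
    cases hX : (pvExpKw.any fun kw => PySem.Str.isIn kw (PySem.Str.lower l)) && decide (PySem.Str.len l < 200) <;>
      simp only [pvStepA, pvCondE, pvCondX, hE, hX, Bool.not_true, Bool.not_false,
        Bool.true_and, Bool.false_and, Bool.and_true, Bool.and_false, if_true, if_false,
        Bool.false_eq_true, reduceIte]

theorem loopA (lines : List String) (e x : List String) :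
    lines.foldl pvStepA (e, x) = (e ++ lines.filter pvCondE, x ++ lines.filter pvCondX) := by
  induction lines generalizing e x with
  | nil => simp
  | cons l ls ih =>
    rw [List.foldl_cons, stepA_eq, ih]
    by_cases hE : pvCondE l = true
    · have hX : pvCondX l = false := by simp [pvCondX, hE]
      simp [hE, hX]
    · by_cases hX : pvCondX l = true <;> simp [hE, hX]

-- B's category tests, pointwise, are exactly A's branch conditions
theorem contains_true {s : PySem.Set String} {x : String} (h : x ∈ s) :
    PySem.Set.contains s x = true := by simp [PySem.Set.contains, h]

theorem contains_false {s : PySem.Set String} {x : String} (h : x ∉ s) :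
    PySem.Set.contains s x = false := by simp [PySem.Set.contains, h]

theorem catE_eq (l : String) : (pvCategory l == some "education") = pvCondE l := by
  unfold pvCategory pvCondE
  by_cases hl : 200 ≤ PySem.Str.len l
  · have hlt : decide (PySem.Str.len l < 200) = false := by
      simp only [decide_eq_false_iff_not]; omega
    simp only [if_pos hl, hlt, Bool.and_false]
    rfl
  · have hlt : decide (PySem.Str.len l < 200) = true := by
      simp only [decide_eq_true_eq]; omega
    cases hE : (pvEduKw.any fun kw => PySem.Str.isIn kw (PySem.Str.lower l)) <;>
      cases hX : (pvExpKw.any fun kw => PySem.Str.isIn kw (PySem.Str.lower l)) <;>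
        simp only [if_neg hl, hE, hX, hlt, Bool.and_true, Bool.false_eq_true, reduceIte] <;> rfl

theorem catX_eq (l : String) : (pvCategory l == some "experience") = pvCondX l := by
  unfold pvCategory pvCondX pvCondE
  by_cases hl : 200 ≤ PySem.Str.len l
  · have hlt : decide (PySem.Str.len l < 200) = false := by
      simp only [decide_eq_false_iff_not]; omega
    simp only [if_pos hl, hlt, Bool.and_false, Bool.not_false]
    rfl
  · have hlt : decide (PySem.Str.len l < 200) = true := by
      simp only [decide_eq_true_eq]; omega
    cases hE : (pvEduKw.any fun kw => PySem.Str.isIn kw (PySem.Str.lower l)) <;>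
      cases hX : (pvExpKw.any fun kw => PySem.Str.isIn kw (PySem.Str.lower l)) <;>
        simp only [if_neg hl, hE, hX, hlt, Bool.and_true, Bool.false_eq_true, Bool.not_false,
          Bool.not_true, Bool.true_and, Bool.false_and, reduceIte] <;> rfl

-- dict.fromkeys-style dedup is A's comprehension dedup started from the empty seen set
theorem foldl_add_eq_dedupA (xs : List String) (s : PySem.Set String) :
    xs.foldl PySem.Set.add s = s ++ pvDedupA s xs := by
  induction xs generalizing s with
  | nil => simp [pvDedupA]
  | cons x xs ih =>
    rw [List.foldl_cons]
    by_cases hx : x ∈ s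
    · rw [PySem.Set.add_of_mem hx, ih]
      simp only [pvDedupA, contains_true hx, if_true]
    · rw [PySem.Set.add_of_not_mem hx, ih]
      simp only [pvDedupA, contains_false hx, Bool.false_eq_true, reduceIte,
        PySem.Set.add_of_not_mem hx]
      simp

theorem dedup_eq_dedupA (xs : List String) :
    PySem.List.dedup xs = pvDedupA PySem.Set.empty xs := by
  have := foldl_add_eq_dedupA xs PySem.Set.empty
  simpa [PySem.List.dedup_eq_ofList, PySem.Set.ofList_eq_foldl, PySem.Set.empty] using this

-- filtering after dedup = dedup of the filtered list, as long as the two seen sets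
-- agree on every element the filter keeps (the filter is a pure function of the value)
theorem filter_dedupA (p : String → Bool) (xs : List String) (s t : PySem.Set String)
    (h : ∀ y, p y = true → (y ∈ s ↔ y ∈ t)) :
    (pvDedupA s xs).filter p = pvDedupA t (xs.filter p) := by
  induction xs generalizing s t with
  | nil => simp [pvDedupA]
  | cons x xs ih =>
    by_cases hp : p x = true
    · by_cases hx : x ∈ s
      · have hxt : x ∈ t := (h x hp).mp hx
        simp only [pvDedupA, contains_true hx, List.filter_cons, hp, if_true,
          contains_true hxt]
        exact ih s t h
      · have hxt : x ∉ t := fun hxt => hx ((h x hp).mpr hxt)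
        simp only [pvDedupA, contains_false hx, List.filter_cons, hp, if_true,
          contains_false hxt, Bool.false_eq_true, reduceIte]
        refine congrArg (x :: ·) (ih _ _ ?_)
        intro y hy
        rw [PySem.Set.mem_add, PySem.Set.mem_add, h y hy]
    · rw [List.filter_cons_of_neg (by simpa using hp)]
      by_cases hx : x ∈ s
      · simp only [pvDedupA, contains_true hx]
        exact ih s t h
      · simp only [pvDedupA, contains_false hx, Bool.false_eq_true, reduceIte]
        rw [List.filter_cons_of_neg (by simpa using hp)]
        refine ih _ _ ?_
        intro y hy
        rw [PySem.Set.mem_add, h y hy]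
        have hne : y ≠ x := fun he => hp (he ▸ hy)
        simp [hne]

-- ===== VERDICT (by name: the statement is the Claim_ definition above) =====
theorem parse_experience_spec : Claim_equal_parse_experience := by
  intro text _
  unfold Spec_parse_experience
  simp only [parse_experience, parse_experience_alt, loopA, dedup_eq_dedupA, List.nil_append]
  have hE : (fun l => pvCategory l == some "education") = pvCondE := funext catE_eq
  have hX : (fun l => pvCategory l == some "experience") = pvCondX := funext catX_eq
  rw [hE, hX,
    filter_dedupA pvCondE _ PySem.Set.empty PySem.Set.empty (fun _ _ => Iff.rfl),
    filter_dedupA pvCondX _ PySem.Set.empty PySem.Set.empty (fun _ _ => Iff.rfl)]
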